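-- pv_equiv track=rewrite | github.com/Tahas13/minilang-compiler | src/vertical_ast.py | _draw_connections
-- ===== SOURCE A (Python) =====
-- from typing import List, Tuple
--
-- def _draw_connections(parent_x: int, children_positions: List[int], level: int) -> List[str]:
--     """Draw connection lines from parent to children."""
--     if not children_positions:
--         return []
--
--     lines = []
--
--     # Calculate the span
--     leftmost = min(children_positions)
--     rightmost = max(children_positions)
--
--     # Draw vertical line down from parent
--     line1 = " " * parent_x + "│"
--     lines.append(line1)
--
--     if len(children_positions) == 1:
--         # Single child - straight line
--         child_x = children_positions[0]
--         if child_x == parent_x: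
--             line2 = " " * parent_x + "│"
--         elif child_x < parent_x:
--             line2 = " " * child_x + "┌" + "─" * (parent_x - child_x - 1) + "┘"
--         else:
--             line2 = " " * parent_x + "└" + "─" * (child_x - parent_x - 1) + "┐"
--         lines.append(line2)
--     else:
--         # Multiple children - horizontal line with branches
--         horizontal_line = [" "] * (rightmost + 1)
--         horizontal_line[parent_x] = "┼"
--
--         for i, child_x in enumerate(children_positions):
--             if child_x < parent_x:
--                 for j in range(child_x, parent_x):
--                     if horizontal_line[j] == " ":
--                         horizontal_line[j] = "─"
--                 horizontal_line[child_x] = "┌"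
--             elif child_x > parent_x:
--                 for j in range(parent_x + 1, child_x + 1):
--                     if horizontal_line[j] == " ":
--                         horizontal_line[j] = "─"
--                 horizontal_line[child_x] = "┐"
--             else:
--                 horizontal_line[child_x] = "┼"
--
--         lines.append("".join(horizontal_line))
--
--         # Draw vertical lines to children
--         vertical_line = [" "] * (rightmost + 1)
--         for child_x in children_positions:
--             vertical_line[child_x] = "│"
--         lines.append("".join(vertical_line))
--
--     return lines
-- ===== SOURCE B (Python) =====
-- from typing import List
--
--
-- def _draw_connections(parent_x: int, children_positions: List[int], level: int) -> List[str]: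
--     """Draw connection lines from parent to children (closed-form per column)."""
--     if not children_positions:
--         return []
--     top = " " * parent_x + "│"
--     if len(children_positions) == 1:
--         c = children_positions[0]
--         if c == parent_x:
--             return [top, " " * parent_x + "│"]
--         lo, hi = min(parent_x, c), max(parent_x, c)
--         left = "┌" if c < parent_x else "└"
--         right = "┘" if c < parent_x else "┐"
--         return [top, " " * lo + left + "─" * (hi - lo - 1) + right]
--     kids = set(children_positions)
--     lo = min(children_positions)
--     hi = max(children_positions)
--
--     def hchar(j: int) -> str:
--         if j in kids:
--             return "┌" if j < parent_x else ("┐" if j > parent_x else "┼")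
--         if j == parent_x:
--             return "┼"
--         if lo <= j < parent_x or parent_x < j <= hi:
--             return "─"
--         return " "
--
--     hrow = "".join(hchar(j) for j in range(hi + 1))
--     vrow = "".join("│" if j in kids else " " for j in range(hi + 1))
--     return [top, hrow, vrow]
-- ===== Notes on version B (the rewrite author's own statement) =====
-- stated objective: alternative
-- what changed: A paints the horizontal row by re-scanning a span of cells per child; B computes each column once from a closed-form rule using the children set and the min/max of the positions.
-- outside the precondition, e.g. on _draw_connections(0, [-2, 1], 0): A returns ['│', '┌┐', '││'], B returns ['│', '┼┐', ' │']
import Mathlib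
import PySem

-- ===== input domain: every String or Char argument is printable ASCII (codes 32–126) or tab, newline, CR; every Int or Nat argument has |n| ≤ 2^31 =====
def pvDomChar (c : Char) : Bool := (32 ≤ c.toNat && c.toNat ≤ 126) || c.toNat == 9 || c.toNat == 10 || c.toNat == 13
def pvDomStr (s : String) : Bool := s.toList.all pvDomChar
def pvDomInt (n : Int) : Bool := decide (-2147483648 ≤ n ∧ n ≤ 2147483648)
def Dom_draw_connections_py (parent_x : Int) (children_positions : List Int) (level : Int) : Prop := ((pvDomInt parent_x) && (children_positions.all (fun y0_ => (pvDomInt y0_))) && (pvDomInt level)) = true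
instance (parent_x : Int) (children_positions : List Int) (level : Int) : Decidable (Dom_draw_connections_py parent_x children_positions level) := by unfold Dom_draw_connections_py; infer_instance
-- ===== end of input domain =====

-- B replaces A's per-child span re-painting of the horizontal row by a single closed-form pass
-- over the columns (objective: alternative algorithm; equal return values on Pre_).

-- ===== PORT A =====
-- " " * n for a Python int n (negative n gives ""): exact, since Int.toNat clamps negatives to 0.
def pvRep (n : Int) (c : Char) : List Char := List.replicate n.toNat c

-- the inner 'for j in range(a, b): if hl[j] == " ": hl[j] = "─"' loop of A
def pvFill (hl : List Char) (a b : Int) : List Char :=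
  (PySem.List.pyRange a b 1).foldl
    (fun l j => if PySem.List.pyGetD l j ' ' = ' ' then PySem.List.pySetD l j '─' else l) hl

-- one iteration of A's 'for i, child_x in enumerate(children_positions)' body (the index i is unused)
def pvStepA (p : Int) (hl : List Char) (c : Int) : List Char :=
  if c < p then PySem.List.pySetD (pvFill hl c p) c '┌'
  else if p < c then PySem.List.pySetD (pvFill hl (p + 1) (c + 1)) c '┐'
  else PySem.List.pySetD hl c '┼'

-- port of A; rows are built as List Char and wrapped with String.ofList ("".join of 1-char strings).
-- A also computes leftmost = min(children_positions) but never uses it, so it is not kept here.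
def draw_connections_py (parent_x : Int) (children_positions : List Int) (level : Int) : List String :=
  if children_positions = [] then []
  else
    let line1 : List Char := pvRep parent_x ' ' ++ ['│']
    if children_positions.length = 1 then
      let child_x := PySem.List.pyGetD children_positions 0 0
      let line2 : List Char :=
        if child_x = parent_x then pvRep parent_x ' ' ++ ['│']
        else if child_x < parent_x then
          pvRep child_x ' ' ++ ['┌'] ++ pvRep (parent_x - child_x - 1) '─' ++ ['┘']
        else
          pvRep parent_x ' ' ++ ['└'] ++ pvRep (child_x - parent_x - 1) '─' ++ ['┐']
      [String.ofList line1, String.ofList line2]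
    else
      let rightmost := PySem.List.maxD children_positions (fun x => x) 0
      let h0 := PySem.List.pySetD (List.replicate (rightmost + 1).toNat ' ') parent_x '┼'
      let hline := children_positions.foldl (pvStepA parent_x) h0
      let vline := children_positions.foldl (fun l c => PySem.List.pySetD l c '│')
                     (List.replicate (rightmost + 1).toNat ' ')
      [String.ofList line1, String.ofList hline, String.ofList vline]

-- ===== PORT B =====
-- closed-form column rule of Source B's hchar
def pvHChar (p lo hi : Int) (kids : PySem.Set Int) (j : Int) : Char :=
  if j ∈ kids then (if j < p then '┌' else if p < j then '┐' else '┼')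
  else if j = p then '┼'
  else if (lo ≤ j ∧ j < p) ∨ (p < j ∧ j ≤ hi) then '─'
  else ' '

def draw_connections_py_alt (parent_x : Int) (children_positions : List Int) (level : Int) : List String :=
  if children_positions = [] then []
  else
    let cs := children_positions
    let top : List Char := pvRep parent_x ' ' ++ ['│']
    if cs.length = 1 then
      let c := PySem.List.pyGetD cs 0 0
      if c = parent_x then [String.ofList top, String.ofList (pvRep parent_x ' ' ++ ['│'])]
      else
        let lo := min parent_x c
        let hi := max parent_x c
        let left : Char := if c < parent_x then '┌' else '└'
        let right : Char := if c < parent_x then '┘' else '┐'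
        [String.ofList top, String.ofList (pvRep lo ' ' ++ [left] ++ pvRep (hi - lo - 1) '─' ++ [right])]
    else
      let kids := PySem.Set.ofList cs
      let lo := PySem.List.minD cs (fun x => x) 0
      let hi := PySem.List.maxD cs (fun x => x) 0
      let hrow := (List.range (hi + 1).toNat).map (fun (k : Nat) => pvHChar parent_x lo hi kids (k : Int))
      let vrow := (List.range (hi + 1).toNat).map (fun (k : Nat) => if (k : Int) ∈ kids then '│' else ' ')
      [String.ofList top, String.ofList hrow, String.ofList vrow]

-- ===== PRECONDITION & SPEC =====
-- Pre_ restricts the MULTI-CHILD case to the natural domain of the drawing: nonnegative column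
-- positions (Python's negative indices silently wrap around, an accident of the list encoding —
-- on such inputs A still returns a value, see the cite in claim.json) and a parent no further
-- right than the rightmost child (beyond it A raises IndexError).
def Pre_draw_connections_py (parent_x : Int) (children_positions : List Int) (level : Int) : Prop :=
  2 ≤ children_positions.length →
    (0 ≤ parent_x ∧ (∀ c ∈ children_positions, 0 ≤ c) ∧ ∃ c ∈ children_positions, parent_x ≤ c)
instance (parent_x : Int) (children_positions : List Int) (level : Int) : Decidable (Pre_draw_connections_py parent_x children_positions level) := by unfold Pre_draw_connections_py; infer_instance

def pvWitness_draw_connections_py : Int × List Int × Int := (1, [0, 2], 0)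

def Spec_draw_connections_py (parent_x : Int) (children_positions : List Int) (level : Int) (out : List String) : Prop := out = draw_connections_py_alt parent_x children_positions level
instance (parent_x : Int) (children_positions : List Int) (level : Int) (out : List String) : Decidable (Spec_draw_connections_py parent_x children_positions level out) := by unfold Spec_draw_connections_py; infer_instance

-- ===== CLAIM (what is proved, stated in full; the proofs are below) =====
def Claim_equal_draw_connections_py : Prop := ∀ (parent_x : Int) (children_positions : List Int) (level : Int), Dom_draw_connections_py parent_x children_positions level → Pre_draw_connections_py parent_x children_positions level → Spec_draw_connections_py parent_x children_positions level (draw_connections_py parent_x children_positions level)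

-- ===== LEMMAS AND PROOFS =====

-- the character A's horizontal-row loop has written at column j after processing the children in S
def pvG (p : Int) (S : List Int) (j : Int) : Char :=
  if j ∈ S then (if j < p then '┌' else if p < j then '┐' else '┼')
  else if j = p then '┼'
  else if (∃ c ∈ S, c ≤ j ∧ j < p) ∨ (∃ c ∈ S, p < j ∧ j ≤ c) then '─'
  else ' '

theorem pvGetD_pySetD (l : List Char) (i j : Int) (v d : Char) (hi0 : 0 ≤ i)
    (hj0 : 0 ≤ j) (hj : j < (l.length : Int)) :
    PySem.List.pyGetD (PySem.List.pySetD l i v) j d = if j = i then v else PySem.List.pyGetD l j d := by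
  rw [PySem.List.pySetD_of_nonneg l v hi0]
  rw [PySem.List.pyGetD_eq_getElem _ _ hj0 (by simpa using hj),
      PySem.List.pyGetD_eq_getElem _ _ hj0 (by simpa using hj)] <;> try simp
  · rw [List.getElem_set]
    split_ifs with h1 h2 h2
    · rfl
    · exact absurd (by omega : j = i) h2
    · exact absurd (by omega : i.toNat = j.toNat) h1
    · rfl

theorem pvFill_spec : ∀ (n : Nat) (a b : Int) (hl : List Char), (b - a).toNat = n → 0 ≤ a →
    b ≤ (hl.length : Int) →
    (pvFill hl a b).length = hl.length ∧
    ∀ j, 0 ≤ j → j < (hl.length : Int) →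
      PySem.List.pyGetD (pvFill hl a b) j ' ' =
        if a ≤ j ∧ j < b ∧ PySem.List.pyGetD hl j ' ' = ' ' then '─'
        else PySem.List.pyGetD hl j ' ' := by
  intro n
  induction n with
  | zero =>
    intro a b hl hn ha _
    have hab : b ≤ a := by omega
    rw [pvFill, PySem.List.pyRange_one_eq_nil hab]
    refine ⟨rfl, fun j hj0 hj => ?_⟩
    simp only [List.foldl_nil]
    split_ifs with h
    · omega
    · rfl
  | succ n ih =>
    intro a b hl hn ha hb
    have hab : a < b := by omega
    have haL : a < (hl.length : Int) := by omega
    rw [pvFill, PySem.List.pyRange_one_cons hab, List.foldl_cons]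
    set l1 := if PySem.List.pyGetD hl a ' ' = ' ' then PySem.List.pySetD hl a '─' else hl with hl1
    have hlen1 : l1.length = hl.length := by
      rw [hl1]; split_ifs <;> simp [PySem.List.length_pySetD]
    have hrec := ih (a + 1) b l1 (by omega) (by omega) (by rw [hlen1]; exact hb)
    rw [pvFill] at hrec
    refine ⟨by rw [hrec.1, hlen1], fun j hj0 hj => ?_⟩
    rw [hrec.2 j hj0 (by rw [hlen1]; exact hj)]
    have hgl1 : PySem.List.pyGetD l1 j ' ' =
        if j = a ∧ PySem.List.pyGetD hl a ' ' = ' ' then '─' else PySem.List.pyGetD hl j ' ' := by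
      rw [hl1]
      by_cases hsp : PySem.List.pyGetD hl a ' ' = ' '
      · simp only [hsp, if_true]
        rw [pvGetD_pySetD hl a j '─' ' ' ha hj0 hj]
        by_cases hja : j = a <;> simp [hja]
      · simp [hsp]
    rw [hgl1]
    by_cases hja : j = a
    · subst hja
      by_cases hsp : PySem.List.pyGetD hl j ' ' = ' '
      · have h1 : ¬ (j + 1 ≤ j) := by omega
        simp [hsp, hab, h1]
      · simp [hsp]
    · simp only [hja, false_and, if_false]
      have hiff : (a + 1 ≤ j ∧ j < b ∧ PySem.List.pyGetD hl j ' ' = ' ')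
          ↔ (a ≤ j ∧ j < b ∧ PySem.List.pyGetD hl j ' ' = ' ') := by
        constructor <;> rintro ⟨u, v, w⟩ <;> exact ⟨by omega, v, w⟩
      rw [if_congr hiff rfl rfl]

theorem pvG_ne_space (p : Int) (S : List Int) (j : Int)
    (h : j ∈ S ∨ j = p ∨ (∃ c ∈ S, c ≤ j ∧ j < p) ∨ (∃ c ∈ S, p < j ∧ j ≤ c)) :
    pvG p S j ≠ ' ' := by
  unfold pvG
  split_ifs with h1 h2 h3 h4 h5
  · decide
  · decide
  · decide
  · decide
  · decide
  · exfalso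
    rcases h with hA | hB | hC | hD
    · exact h1 hA
    · exact h4 hB
    · exact h5 (Or.inl hC)
    · exact h5 (Or.inr hD)

theorem pvStepA_invariant (p c : Int) (S : List Int) (hl : List Char)
    (hp : 0 ≤ p) (hpL : p < (hl.length : Int)) (hc0 : 0 ≤ c) (hcL : c < (hl.length : Int))
    (hIH : ∀ j, 0 ≤ j → j < (hl.length : Int) → PySem.List.pyGetD hl j ' ' = pvG p S j) :
    (pvStepA p hl c).length = hl.length ∧
    ∀ j, 0 ≤ j → j < (hl.length : Int) →
      PySem.List.pyGetD (pvStepA p hl c) j ' ' = pvG p (S ++ [c]) j := by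
  unfold pvStepA
  by_cases hcp : c < p
  · simp only [hcp, if_true]
    obtain ⟨hflen, hfget⟩ := pvFill_spec (p - c).toNat c p hl rfl hc0 (by omega)
    refine ⟨by rw [PySem.List.length_pySetD, hflen], fun j hj0 hj => ?_⟩
    rw [pvGetD_pySetD _ c j _ ' ' hc0 hj0 (by rw [hflen]; exact hj)]
    rw [hfget j hj0 hj, hIH j hj0 hj]
    by_cases hjc : j = c
    · subst hjc
      rw [if_pos rfl]
      unfold pvG
      rw [if_pos (by simp : j ∈ S ++ [j]), if_pos hcp]
    · rw [if_neg hjc]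
      by_cases hjS : j ∈ S
      · have hne := pvG_ne_space p S j (Or.inl hjS)
        rw [if_neg (fun h => hne h.2.2)]
        have hm : j ∈ S ++ [c] := List.mem_append_left _ hjS
        unfold pvG
        rw [if_pos hjS, if_pos hm]
      · by_cases hjp : j = p
        · have hne := pvG_ne_space p S j (Or.inr (Or.inl hjp))
          rw [if_neg (fun h => hne h.2.2)]
          have hm : j ∉ S ++ [c] := by simp [hjS]; omega
          unfold pvG
          rw [if_neg hjS, if_pos hjp, if_neg hm, if_pos hjp]
        · have hm : j ∉ S ++ [c] := by simp [hjS, hjc]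
          by_cases hd : (∃ x ∈ S, x ≤ j ∧ j < p) ∨ (∃ x ∈ S, p < j ∧ j ≤ x)
          · have hne := pvG_ne_space p S j (Or.inr (Or.inr hd))
            rw [if_neg (fun h => hne h.2.2)]
            have hd' : (∃ x ∈ S ++ [c], x ≤ j ∧ j < p) ∨ (∃ x ∈ S ++ [c], p < j ∧ j ≤ x) := by
              rcases hd with ⟨x, hx, h⟩ | ⟨x, hx, h⟩
              · exact Or.inl ⟨x, by simp [hx], h⟩
              · exact Or.inr ⟨x, by simp [hx], h⟩
            unfold pvG
            rw [if_neg hjS, if_neg hjp, if_pos hd, if_neg hm, if_neg hjp, if_pos hd']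
          · have hsp : pvG p S j = ' ' := by
              unfold pvG; rw [if_neg hjS, if_neg hjp, if_neg hd]
            rw [hsp]
            by_cases hcj : c ≤ j ∧ j < p
            · rw [if_pos ⟨hcj.1, hcj.2, rfl⟩]
              have hd' : (∃ x ∈ S ++ [c], x ≤ j ∧ j < p) ∨ (∃ x ∈ S ++ [c], p < j ∧ j ≤ x) :=
                Or.inl ⟨c, by simp, hcj⟩
              unfold pvG
              rw [if_neg hm, if_neg hjp, if_pos hd']
            · rw [if_neg (fun h => hcj ⟨h.1, h.2.1⟩)]
              have hd' : ¬ ((∃ x ∈ S ++ [c], x ≤ j ∧ j < p) ∨ (∃ x ∈ S ++ [c], p < j ∧ j ≤ x)) := by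
                rintro (⟨x, hx, h1, h2⟩ | ⟨x, hx, h1, h2⟩) <;>
                  simp only [List.mem_append, List.mem_singleton] at hx
                · rcases hx with hx | rfl
                  · exact hd (Or.inl ⟨x, hx, h1, h2⟩)
                  · exact hcj ⟨h1, h2⟩
                · rcases hx with hx | rfl
                  · exact hd (Or.inr ⟨x, hx, h1, h2⟩)
                  · omega
              unfold pvG
              rw [if_neg hm, if_neg hjp, if_neg hd']
  · by_cases hpc : p < c
    · simp only [hcp, if_false, hpc, if_true]
      obtain ⟨hflen, hfget⟩ := pvFill_spec (c + 1 - (p + 1)).toNat (p + 1) (c + 1) hl rfl (by omega) (by omega)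
      refine ⟨by rw [PySem.List.length_pySetD, hflen], fun j hj0 hj => ?_⟩
      rw [pvGetD_pySetD _ c j _ ' ' hc0 hj0 (by rw [hflen]; exact hj)]
      rw [hfget j hj0 hj, hIH j hj0 hj]
      by_cases hjc : j = c
      · subst hjc
        rw [if_pos rfl]
        unfold pvG
        rw [if_pos (by simp : j ∈ S ++ [j]), if_neg (by omega : ¬ j < p), if_pos hpc]
      · rw [if_neg hjc]
        by_cases hjS : j ∈ S
        · have hne := pvG_ne_space p S j (Or.inl hjS)
          rw [if_neg (fun h => hne h.2.2)]
          have hm : j ∈ S ++ [c] := List.mem_append_left _ hjS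
          unfold pvG
          rw [if_pos hjS, if_pos hm]
        · by_cases hjp : j = p
          · have hne := pvG_ne_space p S j (Or.inr (Or.inl hjp))
            rw [if_neg (fun h => hne h.2.2)]
            have hm : j ∉ S ++ [c] := by simp [hjS]; omega
            unfold pvG
            rw [if_neg hjS, if_pos hjp, if_neg hm, if_pos hjp]
          · have hm : j ∉ S ++ [c] := by simp [hjS, hjc]
            by_cases hd : (∃ x ∈ S, x ≤ j ∧ j < p) ∨ (∃ x ∈ S, p < j ∧ j ≤ x)
            · have hne := pvG_ne_space p S j (Or.inr (Or.inr hd))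
              rw [if_neg (fun h => hne h.2.2)]
              have hd' : (∃ x ∈ S ++ [c], x ≤ j ∧ j < p) ∨ (∃ x ∈ S ++ [c], p < j ∧ j ≤ x) := by
                rcases hd with ⟨x, hx, h⟩ | ⟨x, hx, h⟩
                · exact Or.inl ⟨x, by simp [hx], h⟩
                · exact Or.inr ⟨x, by simp [hx], h⟩
              unfold pvG
              rw [if_neg hjS, if_neg hjp, if_pos hd, if_neg hm, if_neg hjp, if_pos hd']
            · have hsp : pvG p S j = ' ' := by
                unfold pvG; rw [if_neg hjS, if_neg hjp, if_neg hd]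
              rw [hsp]
              by_cases hcj : p + 1 ≤ j ∧ j < c + 1
              · rw [if_pos ⟨hcj.1, hcj.2, rfl⟩]
                have hd' : (∃ x ∈ S ++ [c], x ≤ j ∧ j < p) ∨ (∃ x ∈ S ++ [c], p < j ∧ j ≤ x) :=
                  Or.inr ⟨c, by simp, by omega, by omega⟩
                unfold pvG
                rw [if_neg hm, if_neg hjp, if_pos hd']
              · rw [if_neg (fun h => hcj ⟨h.1, h.2.1⟩)]
                have hd' : ¬ ((∃ x ∈ S ++ [c], x ≤ j ∧ j < p) ∨ (∃ x ∈ S ++ [c], p < j ∧ j ≤ x)) := by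
                  rintro (⟨x, hx, h1, h2⟩ | ⟨x, hx, h1, h2⟩) <;>
                    simp only [List.mem_append, List.mem_singleton] at hx
                  · rcases hx with hx | rfl
                    · exact hd (Or.inl ⟨x, hx, h1, h2⟩)
                    · omega
                  · rcases hx with hx | rfl
                    · exact hd (Or.inr ⟨x, hx, h1, h2⟩)
                    · exact hcj ⟨by omega, by omega⟩
                unfold pvG
                rw [if_neg hm, if_neg hjp, if_neg hd']
    · have hpc' : c = p := by omega
      subst hpc'
      simp only [hcp, if_false]
      refine ⟨PySem.List.length_pySetD hl c '┼', fun j hj0 hj => ?_⟩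
      rw [pvGetD_pySetD hl c j _ ' ' hc0 hj0 hj, hIH j hj0 hj]
      by_cases hjc : j = c
      · subst hjc
        rw [if_pos rfl]
        unfold pvG
        rw [if_pos (by simp : j ∈ S ++ [j]), if_neg (by omega : ¬ j < j), if_neg (by omega : ¬ j < j)]
      · rw [if_neg hjc]
        by_cases hjS : j ∈ S
        · have hm : j ∈ S ++ [c] := List.mem_append_left _ hjS
          unfold pvG
          rw [if_pos hjS, if_pos hm]
        · have hm : j ∉ S ++ [c] := by simp [hjS, hjc]
          by_cases hjp : j = c
          · exact absurd hjp hjc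
          · have hd' : ((∃ x ∈ S ++ [c], x ≤ j ∧ j < c) ∨ (∃ x ∈ S ++ [c], c < j ∧ j ≤ x))
                ↔ ((∃ x ∈ S, x ≤ j ∧ j < c) ∨ (∃ x ∈ S, c < j ∧ j ≤ x)) := by
              constructor
              · rintro (⟨x, hx, h1, h2⟩ | ⟨x, hx, h1, h2⟩) <;>
                  simp only [List.mem_append, List.mem_singleton] at hx
                · rcases hx with hx | rfl
                  · exact Or.inl ⟨x, hx, h1, h2⟩
                  · omega
                · rcases hx with hx | rfl
                  · exact Or.inr ⟨x, hx, h1, h2⟩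
                  · omega
              · rintro (⟨x, hx, h⟩ | ⟨x, hx, h⟩)
                · exact Or.inl ⟨x, by simp [hx], h⟩
                · exact Or.inr ⟨x, by simp [hx], h⟩
            unfold pvG
            rw [if_neg hjS, if_neg hm]
            by_cases hdd : (∃ x ∈ S, x ≤ j ∧ j < c) ∨ (∃ x ∈ S, c < j ∧ j ≤ x)
            · rw [if_neg hjp, if_pos hdd, if_neg hjp, if_pos (hd'.mpr hdd)]
            · rw [if_neg hjp, if_neg hdd, if_neg hjp, if_neg (fun h => hdd (hd'.mp h))]

theorem pvFoldA (p : Int) : ∀ (cs S : List Int) (hl : List Char),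
    0 ≤ p → p < (hl.length : Int) →
    (∀ c ∈ cs, 0 ≤ c ∧ c < (hl.length : Int)) →
    (∀ j, 0 ≤ j → j < (hl.length : Int) → PySem.List.pyGetD hl j ' ' = pvG p S j) →
    (cs.foldl (pvStepA p) hl).length = hl.length ∧
    ∀ j, 0 ≤ j → j < (hl.length : Int) →
      PySem.List.pyGetD (cs.foldl (pvStepA p) hl) j ' ' = pvG p (S ++ cs) j := by
  intro cs
  induction cs with
  | nil => intro S hl _ _ _ hIH; exact ⟨rfl, by simpa using hIH⟩
  | cons c cs ih =>
    intro S hl hp hpL hmem hIH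
    obtain ⟨hlen1, hget1⟩ := pvStepA_invariant p c S hl hp hpL (hmem c (by simp)).1 (hmem c (by simp)).2 hIH
    have hrec := ih (S ++ [c]) (pvStepA p hl c) hp (by rw [hlen1]; exact hpL)
      (fun x hx => by rw [hlen1]; exact hmem x (by simp [hx]))
      (fun j hj0 hj => hget1 j hj0 (by rw [← hlen1]; exact hj))
    rw [List.foldl_cons]
    refine ⟨by rw [hrec.1, hlen1], fun j hj0 hj => ?_⟩
    rw [hrec.2 j hj0 (by rw [hlen1]; exact hj)]
    simp

theorem pvFoldV : ∀ (cs S : List Int) (vl : List Char),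
    (∀ c ∈ cs, 0 ≤ c ∧ c < (vl.length : Int)) →
    (∀ j, 0 ≤ j → j < (vl.length : Int) →
      PySem.List.pyGetD vl j ' ' = if j ∈ S then '│' else ' ') →
    (cs.foldl (fun l c => PySem.List.pySetD l c '│') vl).length = vl.length ∧
    ∀ j, 0 ≤ j → j < (vl.length : Int) →
      PySem.List.pyGetD (cs.foldl (fun l c => PySem.List.pySetD l c '│') vl) j ' ' =
        if j ∈ S ++ cs then '│' else ' ' := by
  intro cs
  induction cs with
  | nil => intro S vl _ hIH; exact ⟨rfl, by simpa using hIH⟩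
  | cons c cs ih =>
    intro S vl hmem hIH
    have hlen1 : (PySem.List.pySetD vl c '│').length = vl.length := PySem.List.length_pySetD vl c '│'
    have hget1 : ∀ j, 0 ≤ j → j < (vl.length : Int) →
        PySem.List.pyGetD (PySem.List.pySetD vl c '│') j ' ' = if j ∈ S ++ [c] then '│' else ' ' := by
      intro j hj0 hj
      rw [pvGetD_pySetD vl c j '│' ' ' (hmem c (by simp)).1 hj0 hj, hIH j hj0 hj]
      by_cases hjc : j = c
      · simp [hjc]
      · by_cases hjS : j ∈ S <;> simp [hjc, hjS]
    have hrec := ih (S ++ [c]) (PySem.List.pySetD vl c '│')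
      (fun x hx => by rw [hlen1]; exact hmem x (by simp [hx]))
      (fun j hj0 hj => hget1 j hj0 (by rw [← hlen1]; exact hj))
    rw [List.foldl_cons]
    refine ⟨by rw [hrec.1, hlen1], fun j hj0 hj => ?_⟩
    rw [hrec.2 j hj0 (by rw [hlen1]; exact hj)]
    simp

theorem pvReplicate_get (W : Nat) (j : Int) (hj0 : 0 ≤ j) (hj : j < (W : Int)) (c d : Char) :
    PySem.List.pyGetD (List.replicate W c) j d = c := by
  rw [PySem.List.pyGetD_eq_getElem _ d hj0 (by simpa using hj)]
  exact List.getElem_replicate _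

theorem pvMin_spec (cs : List Int) (hne : cs ≠ []) :
    PySem.List.minD cs (fun x => x) 0 ∈ cs ∧ ∀ x ∈ cs, PySem.List.minD cs (fun x => x) 0 ≤ x := by
  cases h : PySem.List.min? cs (fun x => x) with
  | none => exact absurd ((PySem.List.min?_eq_none_iff cs (fun x => x)).mp h) hne
  | some m =>
    have : PySem.List.minD cs (fun x => x) 0 = m := by simp [PySem.List.minD, h]
    rw [this]
    exact ⟨PySem.List.min?_mem h, fun x hx => PySem.List.min?_isMin h x hx⟩

theorem pvMax_spec (cs : List Int) (hne : cs ≠ []) :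
    PySem.List.maxD cs (fun x => x) 0 ∈ cs ∧ ∀ x ∈ cs, x ≤ PySem.List.maxD cs (fun x => x) 0 := by
  cases h : PySem.List.max? cs (fun x => x) with
  | none => exact absurd ((PySem.List.max?_eq_none_iff cs (fun x => x)).mp h) hne
  | some m =>
    have : PySem.List.maxD cs (fun x => x) 0 = m := by simp [PySem.List.maxD, h]
    rw [this]
    exact ⟨PySem.List.max?_mem h, fun x hx => PySem.List.max?_isMax h x hx⟩

theorem pvG_eq_hchar (p : Int) (cs : List Int) (hne : cs ≠ []) (j : Int) :
    pvG p cs j =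
      pvHChar p (PySem.List.minD cs (fun x => x) 0) (PySem.List.maxD cs (fun x => x) 0)
        (PySem.Set.ofList cs) j := by
  obtain ⟨hloMem, hloLe⟩ := pvMin_spec cs hne
  obtain ⟨hhiMem, hhiLe⟩ := pvMax_spec cs hne
  unfold pvG pvHChar
  rw [if_congr (Iff.symm (PySem.Set.mem_ofList cs j)) rfl rfl]
  refine if_congr Iff.rfl rfl (if_congr Iff.rfl rfl (if_congr ?_ rfl rfl))
  constructor
  · rintro (⟨x, hx, h1, h2⟩ | ⟨x, hx, h1, h2⟩)
    · exact Or.inl ⟨le_trans (hloLe x hx) h1, h2⟩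
    · exact Or.inr ⟨h1, le_trans h2 (hhiLe x hx)⟩
  · rintro (⟨h1, h2⟩ | ⟨h1, h2⟩)
    · exact Or.inl ⟨_, hloMem, h1, h2⟩
    · exact Or.inr ⟨_, hhiMem, h1, h2⟩

-- ===== VERDICT (by name: the statement is the Claim_ definition above) =====
theorem draw_connections_py_spec : Claim_equal_draw_connections_py := by
  intro p cs level _hDom hPre
  unfold Spec_draw_connections_py
  match cs with
  | [] => rfl
  | [c] =>
    show draw_connections_py p [c] level = draw_connections_py_alt p [c] level
    unfold draw_connections_py draw_connections_py_alt
    rw [if_neg (by simp : ¬ ([c] : List Int) = []), if_neg (by simp : ¬ ([c] : List Int) = [])]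
    rw [if_pos (by simp : ([c] : List Int).length = 1), if_pos (by simp : ([c] : List Int).length = 1)]
    have hc : PySem.List.pyGetD [c] 0 0 = c := by simp [PySem.List.pyGetD_zero_cons]
    rw [hc]
    dsimp only
    by_cases hce : c = p
    · simp [hce]
    · by_cases hcp : c < p
      · have h1 := min_eq_right (le_of_lt hcp)
        have h2 := max_eq_left (le_of_lt hcp)
        simp [hce, hcp, h1, h2]
      · have hpc : p < c := by omega
        have h1 := min_eq_left (le_of_lt hpc)
        have h2 := max_eq_right (le_of_lt hpc)
        simp [hce, hcp, h1, h2]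
  | c1 :: c2 :: rest =>
    have h2 : 2 ≤ (c1 :: c2 :: rest).length := by simp
    obtain ⟨hp0, hcs0, cw, hcwMem, hcwLe⟩ := hPre h2
    set cs' : List Int := c1 :: c2 :: rest with hcs'
    have hne : cs' ≠ [] := by simp [hcs']
    show draw_connections_py p cs' level = draw_connections_py_alt p cs' level
    unfold draw_connections_py draw_connections_py_alt
    rw [if_neg hne, if_neg hne]
    rw [if_neg (by simp [hcs'] : ¬ cs'.length = 1), if_neg (by simp [hcs'] : ¬ cs'.length = 1)]
    dsimp only
    obtain ⟨hhiMem, hhiLe⟩ := pvMax_spec cs' hne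
    obtain ⟨hloMem, hloLe⟩ := pvMin_spec cs' hne
    set hi := PySem.List.maxD cs' (fun x => x) 0 with hhi
    have hhi0 : 0 ≤ hi := hcs0 hi hhiMem
    have hphi : p ≤ hi := le_trans hcwLe (hhiLe cw hcwMem)
    have hW : ((hi + 1).toNat : Int) = hi + 1 := by omega
    -- horizontal row
    have hmem : ∀ x ∈ cs', 0 ≤ x ∧ x < (((List.replicate (hi+1).toNat ' ').length : Nat) : Int) := by
      intro x hx
      refine ⟨hcs0 x hx, ?_⟩
      simp only [List.length_replicate]
      rw [hW]
      have := hhiLe x hx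
      omega
    have hinit : ∀ j, 0 ≤ j →
        j < (((PySem.List.pySetD (List.replicate (hi+1).toNat ' ') p '┼').length : Nat) : Int) →
        PySem.List.pyGetD (PySem.List.pySetD (List.replicate (hi+1).toNat ' ') p '┼') j ' ' =
          pvG p [] j := by
      intro j hj0 hj
      rw [PySem.List.length_pySetD] at hj
      rw [pvGetD_pySetD _ p j '┼' ' ' hp0 hj0 (by simpa using hj)]
      rw [pvReplicate_get (hi+1).toNat j hj0 (by simpa using hj) ' ' ' ']
      by_cases hjp : j = p
      · simp [pvG, hjp]
      · simp [pvG, hjp]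
    have hA := pvFoldA p cs' [] (PySem.List.pySetD (List.replicate (hi+1).toNat ' ') p '┼')
      hp0 (by rw [PySem.List.length_pySetD]; simp only [List.length_replicate]; omega)
      (fun x hx => by rw [PySem.List.length_pySetD]; exact hmem x hx) hinit
    have hlenA : (cs'.foldl (pvStepA p) (PySem.List.pySetD (List.replicate (hi+1).toNat ' ') p '┼')).length
        = (hi+1).toNat := by
      rw [hA.1, PySem.List.length_pySetD, List.length_replicate]
    have hrow_eq : cs'.foldl (pvStepA p) (PySem.List.pySetD (List.replicate (hi+1).toNat ' ') p '┼')
        = (List.range (hi + 1).toNat).map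
            (fun (k : Nat) => pvHChar p (PySem.List.minD cs' (fun x => x) 0) hi (PySem.Set.ofList cs') (k : Int)) := by
      apply List.ext_getElem
      · rw [hlenA]; simp
      · intro k hk1 hk2
        have hkW : k < (hi+1).toNat := by rw [hlenA] at hk1; exact hk1
        have hget := hA.2 (k : Int) (by positivity)
          (by rw [PySem.List.length_pySetD, List.length_replicate]; exact_mod_cast hkW)
        rw [PySem.List.pyGetD_eq_getElem _ ' ' (by positivity)
          (by rw [hlenA]; exact_mod_cast hkW)] at hget
        simp only [Int.toNat_natCast] at hget
        rw [hget]
        simp only [List.nil_append, List.getElem_map, List.getElem_range]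
        exact pvG_eq_hchar p cs' hne (k : Int)
    -- vertical row
    have hV := pvFoldV cs' [] (List.replicate (hi+1).toNat ' ')
      (fun x hx => hmem x hx)
      (fun j hj0 hj => by
        rw [pvReplicate_get (hi+1).toNat j hj0 (by simpa using hj) ' ' ' ']
        simp)
    have hlenV : (cs'.foldl (fun l c => PySem.List.pySetD l c '│') (List.replicate (hi+1).toNat ' ')).length
        = (hi+1).toNat := by rw [hV.1, List.length_replicate]
    have vrow_eq : cs'.foldl (fun l c => PySem.List.pySetD l c '│') (List.replicate (hi+1).toNat ' ')
        = (List.range (hi + 1).toNat).map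
            (fun (k : Nat) => if (k : Int) ∈ PySem.Set.ofList cs' then '│' else ' ') := by
      apply List.ext_getElem
      · rw [hlenV]; simp
      · intro k hk1 hk2
        have hkW : k < (hi+1).toNat := by rw [hlenV] at hk1; exact hk1
        have hget := hV.2 (k : Int) (by positivity)
          (by rw [List.length_replicate]; exact_mod_cast hkW)
        rw [PySem.List.pyGetD_eq_getElem _ ' ' (by positivity)
          (by rw [hlenV]; exact_mod_cast hkW)] at hget
        simp only [Int.toNat_natCast] at hget
        rw [hget]
        simp only [List.nil_append, List.getElem_map, List.getElem_range]
        simp [PySem.Set.mem_ofList]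
    rw [hrow_eq, vrow_eq]
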